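-- pv_equiv track=rewrite | github.com/spsanps/nanoSmol | fVLM/scripts/estimate_flops.py | flops_dino_encoder
-- ===== SOURCE A (Python) =====
-- DINO_DIM = 384
--
-- DINO_HEADS = 6
--
-- DINO_LAYERS = 12
--
-- DINO_MLP_RATIO = 4
--
-- PATCH_SIZE = 14
--
-- def flops_linear(in_dim, out_dim, batch=1):
--     """FLOPs for linear layer: 2 * in * out (multiply-add)"""
--     return 2 * batch * in_dim * out_dim
--
-- def flops_attention(seq_len, dim, num_heads):
--     """FLOPs for multi-head attention.
--
--     QKV projection: 3 * 2 * seq * dim * dim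
--     Attention scores: 2 * seq * seq * dim
--     Attention @ V: 2 * seq * seq * dim
--     Output projection: 2 * seq * dim * dim
--     """
--     qkv = 3 * flops_linear(dim, dim, seq_len)
--     scores = 2 * seq_len * seq_len * dim
--     attn_v = 2 * seq_len * seq_len * dim
--     out_proj = flops_linear(dim, dim, seq_len)
--     return qkv + scores + attn_v + out_proj
--
-- def flops_mlp(seq_len, dim, mlp_ratio=4):
--     """FLOPs for MLP block (2 linear layers with expansion)."""
--     hidden = int(dim * mlp_ratio)
--     up = flops_linear(dim, hidden, seq_len)
--     down = flops_linear(hidden, dim, seq_len)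
--     return up + down
--
-- def flops_transformer_layer(seq_len, dim, num_heads, mlp_ratio=4):
--     """FLOPs for one transformer layer."""
--     attn = flops_attention(seq_len, dim, num_heads)
--     mlp = flops_mlp(seq_len, dim, mlp_ratio)
--     # LayerNorm: negligible compared to attention/MLP
--     return attn + mlp
--
-- def flops_dino_encoder(frame_size):
--     """FLOPs for DINOv2-small encoding one frame."""
--     num_patches = (frame_size // PATCH_SIZE) ** 2
--     seq_len = num_patches + 1  # +1 for CLS token
--
--     # Patch embedding (conv)
--     patch_embed = 2 * 3 * PATCH_SIZE * PATCH_SIZE * DINO_DIM * num_patches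
--
--     # Transformer layers
--     transformer = sum(
--         flops_transformer_layer(seq_len, DINO_DIM, DINO_HEADS, DINO_MLP_RATIO)
--         for _ in range(DINO_LAYERS)
--     )
--
--     return patch_embed + transformer
-- ===== SOURCE B (Python) =====
-- # Total encoder FLOPs, viewed as a degree-2 polynomial in t = (frame_size//14)**2,
-- # evaluated by Horner's scheme with precomputed integer coefficients.
-- #
-- # Derivation (d=384, s=t+1): per layer = 24*s*d^2 + 4*s^2*d; 12 layers plus
-- # patch_embed = 2*3*14*14*d*t gives
-- #   48*d*(t+1)^2 + 288*d^2*(t+1) + 451584*t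
-- #   = 18432*t^2 + 42955776*t + 42485760.
-- C2 = 18432        # 48 * 384
-- C1 = 42955776     # 2*18432 + 288*384**2 + 451584
-- C0 = 42485760     # 18432 + 288*384**2
--
-- def flops_dino_encoder(frame_size):
--     """FLOPs for DINOv2-small encoding one frame (polynomial in num_patches, Horner)."""
--     t = (frame_size // 14) ** 2
--     return (C2 * t + C1) * t + C0
-- ===== Notes on version B (the rewrite author's own statement) =====
-- stated objective: simpler
-- what changed: Treats the total as a degree-2 polynomial in num_patches with precomputed integer coefficients and evaluates it by Horner's scheme, instead of summing per-layer helper-function FLOP counts over 12 layers.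
import Mathlib
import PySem

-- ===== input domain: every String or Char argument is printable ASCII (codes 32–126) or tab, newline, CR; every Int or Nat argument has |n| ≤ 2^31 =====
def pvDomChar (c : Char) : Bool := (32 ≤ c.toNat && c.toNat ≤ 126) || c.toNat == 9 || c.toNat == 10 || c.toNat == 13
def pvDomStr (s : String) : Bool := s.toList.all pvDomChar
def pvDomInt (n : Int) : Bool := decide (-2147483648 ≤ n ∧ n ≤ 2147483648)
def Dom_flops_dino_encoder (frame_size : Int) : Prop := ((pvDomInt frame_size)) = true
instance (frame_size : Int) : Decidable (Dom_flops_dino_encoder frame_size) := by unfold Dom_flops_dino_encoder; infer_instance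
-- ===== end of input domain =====

-- B evaluates the total as a precomputed degree-2 polynomial in num_patches via Horner's scheme (simpler).


-- ===== PORT A =====
def pv_flops_linear (in_dim out_dim batch : Int) : Int :=
  2 * batch * in_dim * out_dim

def pv_flops_attention (seq_len dim _num_heads : Int) : Int :=
  let qkv := 3 * pv_flops_linear dim dim seq_len
  let scores := 2 * seq_len * seq_len * dim
  let attn_v := 2 * seq_len * seq_len * dim
  let out_proj := pv_flops_linear dim dim seq_len
  qkv + scores + attn_v + out_proj

def pv_flops_mlp (seq_len dim mlp_ratio : Int) : Int :=
  let hidden := dim * mlp_ratio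
  let up := pv_flops_linear dim hidden seq_len
  let down := pv_flops_linear hidden dim seq_len
  up + down

def pv_flops_transformer_layer (seq_len dim num_heads mlp_ratio : Int) : Int :=
  pv_flops_attention seq_len dim num_heads + pv_flops_mlp seq_len dim mlp_ratio

def flops_dino_encoder (frame_size : Int) : Int :=
  let num_patches := (PySem.Int.floordiv frame_size 14) ^ 2
  let seq_len := num_patches + 1
  let patch_embed := 2 * 3 * 14 * 14 * 384 * num_patches
  let transformer :=
    ((PySem.List.pyRange 0 12 1).foldl
      (fun acc _ => acc + pv_flops_transformer_layer seq_len 384 6 4) 0)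
  patch_embed + transformer

-- ===== PORT B =====
-- B: total = C2*t^2 + C1*t + C0 with t = (frame_size//14)^2, by Horner's scheme.
def flops_dino_encoder_alt (frame_size : Int) : Int :=
  let t := (PySem.Int.floordiv frame_size 14) ^ 2
  (18432 * t + 42955776) * t + 42485760

-- ===== PRECONDITION & SPEC =====
def Spec_flops_dino_encoder (frame_size : Int) (out : Int) : Prop := out = flops_dino_encoder_alt frame_size
instance (frame_size : Int) (out : Int) : Decidable (Spec_flops_dino_encoder frame_size out) := by unfold Spec_flops_dino_encoder; infer_instance

-- ===== CLAIM =====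
def Claim_equal_flops_dino_encoder : Prop := ∀ (frame_size : Int), Dom_flops_dino_encoder frame_size → Spec_flops_dino_encoder frame_size (flops_dino_encoder frame_size)

-- ===== LEMMAS AND PROOFS =====

-- ===== VERDICT =====
theorem flops_dino_encoder_spec : Claim_equal_flops_dino_encoder := by
  intro frame_size _
  unfold Spec_flops_dino_encoder flops_dino_encoder flops_dino_encoder_alt
  have h : PySem.List.pyRange 0 12 1 = [0,1,2,3,4,5,6,7,8,9,10,11] := by decide
  rw [h]
  simp only [List.foldl, pv_flops_transformer_layer,
    pv_flops_attention, pv_flops_mlp, pv_flops_linear]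
  ring
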